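-- pv_equiv track=rewrite | github.com/justinstimatze/plancheck | scripts/pr_backtest.py | module_to_files
-- ===== SOURCE A (Python) =====
-- def module_to_files(module_path: str, all_files: set[str]) -> set[str]:
--     """Map a module path to likely files in the PR."""
--     # Module path: github.com/gin-gonic/gin/internal/bytesconv
--     # File might be: internal/bytesconv/bytesconv.go
--     parts = module_path.split('/')
--     matches = set()
--     for f in all_files:
--         for i in range(len(parts)):
--             suffix = '/'.join(parts[i:])
--             if f.startswith(suffix) or suffix in f:
--                 matches.add(f)
--                 break
--     return matches
-- ===== SOURCE B (Python) =====
-- def module_to_files(module_path: str, all_files: set[str]) -> set[str]: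
--     """Map a module path to likely files in the PR."""
--     # Every suffix '/'.join(parts[i:]) contains parts[-1] as a substring, and
--     # 'startswith' implies 'in', so the whole nested test collapses to one
--     # substring check against the last path component.
--     last = module_path.split('/')[-1]
--     return {f for f in all_files if last in f}
-- ===== Notes on version B (the rewrite author's own statement) =====
-- stated objective: faster
-- what changed: The nested loop over all suffixes of the module path (rebuilding each suffix string and testing startswith/in) is replaced by a single substring test against the last path component, which is equivalent because every suffix contains the last component and startswith implies containment.
import Mathlib
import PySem

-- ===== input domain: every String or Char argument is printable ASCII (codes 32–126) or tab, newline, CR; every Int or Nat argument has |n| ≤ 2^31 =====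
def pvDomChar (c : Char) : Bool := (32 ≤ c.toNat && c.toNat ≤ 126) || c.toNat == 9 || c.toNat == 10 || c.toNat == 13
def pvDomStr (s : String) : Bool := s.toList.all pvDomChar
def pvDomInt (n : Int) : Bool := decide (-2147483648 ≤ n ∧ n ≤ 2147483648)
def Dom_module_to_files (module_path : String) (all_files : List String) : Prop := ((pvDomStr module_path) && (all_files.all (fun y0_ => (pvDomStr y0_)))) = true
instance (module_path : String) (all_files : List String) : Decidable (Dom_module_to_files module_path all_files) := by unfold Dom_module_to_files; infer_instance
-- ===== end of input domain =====

-- B replaces A's nested loop over all module-path suffixes by one substring test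
-- against the last path component (equivalent; measurably faster).

-- ===== PORT A =====
-- 'for i in range(len(parts)): if cond: matches.add(f); break' adds f exactly when
-- some i satisfies cond, i.e. when the range has an index with cond true.
def module_to_files (module_path : String) (all_files : List String) : List String :=
  let parts := (PySem.Str.split? module_path "/").getD []  -- sep "/" ≠ "", so split? is always some
  all_files.foldl (fun ms f =>
    if (List.range parts.length).any (fun i =>
        let suffix := PySem.Str.join "/" (PySem.List.slice parts (some (i : Int)) none)
        PySem.Str.startswith f suffix || PySem.Str.isIn suffix f)
    then PySem.Set.add ms f else ms) PySem.Set.empty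

-- ===== PORT B =====
def module_to_files_alt (module_path : String) (all_files : List String) : List String :=
  -- parts[-1]; split on "/" never yields an empty list, so the default is never used
  let last := ((PySem.Str.split? module_path "/").getD []).getLastD ""
  all_files.filter (fun f => PySem.Str.isIn last f)

-- ===== PRECONDITION & SPEC =====
-- all_files is a Python set[str]: its List representation holds DISTINCT elements;
-- lists with duplicates do not represent any actual input of A.
def Pre_module_to_files (module_path : String) (all_files : List String) : Prop :=
  all_files.Nodup
instance (module_path : String) (all_files : List String) : Decidable (Pre_module_to_files module_path all_files) := by unfold Pre_module_to_files; infer_instance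
def pvWitness_module_to_files : String × List String := ("github.com/x/internal/bc", ["internal/bc/bc.go", "README.md"])
def Spec_module_to_files (module_path : String) (all_files : List String) (out : List String) : Prop := out = module_to_files_alt module_path all_files
instance (module_path : String) (all_files : List String) (out : List String) : Decidable (Spec_module_to_files module_path all_files out) := by unfold Spec_module_to_files; infer_instance

-- ===== CLAIM (what is proved, stated in full; the proofs are below) =====
def Claim_equal_module_to_files : Prop := ∀ (module_path : String) (all_files : List String), Dom_module_to_files module_path all_files → Pre_module_to_files module_path all_files → Spec_module_to_files module_path all_files (module_to_files module_path all_files)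

-- ===== LEMMAS AND PROOFS =====

theorem pv_go_ne_nil (sep : List Char) (fuel : Nat) : ∀ (l cur : List Char) (acc : List (List Char)),
    PySem.Chars.splitOn.go sep fuel l cur acc ≠ [] := by
  induction fuel with
  | zero => intro l cur acc; simp [PySem.Chars.splitOn.go]
  | succ n ih =>
    intro l cur acc
    cases l with
    | nil => simp [PySem.Chars.splitOn.go]
    | cons c rest =>
      rw [PySem.Chars.splitOn.go]
      split
      · exact ih _ _ _
      · exact ih _ _ _

theorem pv_parts_ne_nil (mp : String) : (PySem.Str.split? mp "/").getD [] ≠ [] := by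
  rw [PySem.Str.split?, PySem.Chars.split?]
  have hsep : ("/" : String).toList = ['/'] := by decide
  rw [hsep]
  simp only [List.isEmpty_cons, if_false, Option.map_some, Option.getD_some, Bool.false_eq_true]
  rw [PySem.Chars.splitOn]
  intro h
  exact pv_go_ne_nil ['/'] _ _ _ _ (by simpa using congrArg (List.map String.toList) h)

theorem pv_toList_getLastD : ∀ (l : List String) (d : String),
    (l.map String.toList).getLastD d.toList = (l.getLastD d).toList := by
  intro l
  induction l with
  | nil => intro d; rfl
  | cons a t ih =>
    intro d
    simp only [List.map_cons, List.getLastD_cons]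
    exact ih a

theorem pv_getLastD_of_ne_nil {α : Type} (l : List α) (h : l ≠ []) (d d' : α) :
    l.getLastD d = l.getLastD d' := by
  rw [List.getLastD_eq_getLast?, List.getLastD_eq_getLast?, List.getLast?_eq_some_getLast h]
  rfl

theorem pv_last_infix_join (sep : List Char) : ∀ (l : List (List Char)), l ≠ [] →
    l.getLastD [] <:+: PySem.Chars.join sep l := by
  intro l
  induction l with
  | nil => intro h; exact absurd rfl h
  | cons p t ih =>
    intro _
    cases t with
    | nil => simp [PySem.Chars.join_singleton]
    | cons q rest =>
      rw [PySem.Chars.join_cons_cons, List.getLastD_cons,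
        pv_getLastD_of_ne_nil (q :: rest) (by simp) p []]
      obtain ⟨s, u, hsu⟩ := ih (by simp)
      exact ⟨(p ++ sep) ++ s, u, by simp [← hsu]⟩

theorem pv_drop_length_sub_one : ∀ (l : List String), l ≠ [] →
    l.drop (l.length - 1) = [l.getLastD ""] := by
  intro l
  induction l with
  | nil => intro h; exact absurd rfl h
  | cons a t ih =>
    intro _
    cases t with
    | nil => rfl
    | cons b r =>
      have hIH := ih (by simp)
      simp only [List.length_cons, Nat.add_sub_cancel] at hIH ⊢
      rw [List.drop_succ_cons, List.getLastD_cons,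
        pv_getLastD_of_ne_nil (b :: r) (by simp) a ""]
      exact hIH

-- the per-file condition of A collapses to one substring test against the last component
theorem pv_cond_iff (parts : List String) (hp : parts ≠ []) (f : String) :
    (List.range parts.length).any (fun i =>
        PySem.Str.startswith f (PySem.Str.join "/" (PySem.List.slice parts (some (i : Int)) none)) ||
        PySem.Str.isIn (PySem.Str.join "/" (PySem.List.slice parts (some (i : Int)) none)) f)
      = PySem.Str.isIn (parts.getLastD "") f := by
  rw [Bool.eq_iff_iff]
  simp only [List.any_eq_true, List.mem_range, Bool.or_eq_true]
  constructor
  · rintro ⟨i, hi, hcond⟩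
    rw [PySem.List.slice_from_natCast] at hcond
    have hsuf : (PySem.Str.join "/" (parts.drop i)).toList <:+: f.toList := by
      rcases hcond with h | h
      · rw [PySem.Str.startswith_eq] at h
        exact ((PySem.Chars.startswith_iff _ _).mp h).isInfix
      · exact (PySem.Str.isIn_iff_infix _ _).mp h
    have hdrop : parts.drop i ≠ [] := by
      intro hnil
      have := congrArg List.length hnil
      simp at this
      omega
    have hlast : (parts.getLastD "").toList <:+: (PySem.Str.join "/" (parts.drop i)).toList := by
      rw [PySem.Str.toList_join]
      have h1 := pv_last_infix_join ("/" : String).toList ((parts.drop i).map String.toList)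
        (by simpa using hdrop)
      have h4 : (parts.drop i).getLastD "" = parts.getLastD "" := by
        conv_rhs => rw [← List.take_append_drop i parts]
        rw [List.getLastD_eq_getLast?, List.getLastD_eq_getLast?,
          List.getLast?_append_of_ne_nil _ hdrop]
      have h2 : ((parts.drop i).map String.toList).getLastD [] = (parts.getLastD "").toList := by
        have e : ([] : List Char) = ("" : String).toList := rfl
        rw [e, pv_toList_getLastD, h4]
      rw [← h2]
      exact h1
    rw [PySem.Str.isIn_iff_infix]
    exact hlast.trans hsuf
  · intro h
    refine ⟨parts.length - 1, ?_, Or.inr ?_⟩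
    · have : 0 < parts.length := List.length_pos_iff.mpr hp
      omega
    · rw [PySem.List.slice_from_natCast, pv_drop_length_sub_one parts hp]
      rw [PySem.Str.isIn_iff_infix] at h ⊢
      rw [PySem.Str.toList_join]
      simpa [PySem.Chars.join_singleton] using h

theorem pv_foldl_add_filter (C : String → Bool) : ∀ (fs acc : List String),
    (∀ f ∈ fs, f ∉ acc) → fs.Nodup →
    fs.foldl (fun m f => if C f then PySem.Set.add m f else m) acc = acc ++ fs.filter C := by
  intro fs
  induction fs with
  | nil => intro acc _ _; simp
  | cons f t ih =>
    intro acc hdisj hnd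
    rcases List.nodup_cons.mp hnd with ⟨hfnot, htnd⟩
    simp only [List.foldl_cons]
    by_cases hc : C f = true
    · have hcontains : PySem.Set.contains acc f = false := by
        rw [Bool.eq_false_iff]
        intro habs
        exact hdisj f (by simp) ((PySem.Set.contains_iff acc f).mp habs)
      have hadd : PySem.Set.add acc f = acc ++ [f] := by
        simp only [PySem.Set.add]
        rw [hcontains]
        rfl
      rw [hc, if_pos rfl, hadd,
        ih (acc ++ [f]) (by
          intro g hg
          simp only [List.mem_append, List.mem_singleton]
          rintro (h | h)
          · exact hdisj g (by simp [hg]) h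
          · exact hfnot (h ▸ hg)) htnd]
      simp [hc]
    · rw [if_neg hc, ih acc (fun g hg => hdisj g (by simp [hg])) htnd]
      simp [hc]

-- ===== VERDICT (by name: the statement is the Claim_ definition above) =====
theorem module_to_files_spec : Claim_equal_module_to_files := by
  intro mp fs _ hpre
  unfold Spec_module_to_files module_to_files module_to_files_alt
  have hp := pv_parts_ne_nil mp
  rw [pv_foldl_add_filter _ fs PySem.Set.empty (by intro f hf h; exact absurd h (by simp [PySem.Set.empty])) hpre]
  simp only [PySem.Set.empty, List.nil_append]
  apply List.filter_congr
  intro f _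
  exact pv_cond_iff _ hp f
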